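-- pv_equiv track=rewrite | github.com/dcavaltria/ValtriaPyTools.extension | lib/valtria_lib.py | _collect_columns
-- ===== SOURCE A (Python) =====
-- def _collect_columns(rows):
--     columns = []
--     seen = set()
--     preferred = [
--         "id",
--         "category",
--         "name",
--         "type",
--         "length_m",
--         "area_m2",
--         "volume_m3",
--         "system_name",
--         "system_abbreviation",
--         "system_type",
--         "system_classification",
--         "flow",
--         "calculated_size",
--     ]
--     for col in preferred:
--         for row in rows:
--             if col in row and col not in seen:
--                 seen.add(col)
--                 columns.append(col)
--                 break
--     for row in rows:
--         for key in row.keys():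
--             if key not in seen:
--                 seen.add(key)
--                 columns.append(key)
--     return columns
-- ===== SOURCE B (Python) =====
-- def _collect_columns(rows):
--     preferred = [
--         "id",
--         "category",
--         "name",
--         "type",
--         "length_m",
--         "area_m2",
--         "volume_m3",
--         "system_name",
--         "system_abbreviation",
--         "system_type",
--         "system_classification",
--         "flow",
--         "calculated_size",
--     ]
--     # one pass: every key in first-seen order, plus a membership set
--     present = set()
--     encounter = []
--     for row in rows:
--         for key in row.keys():
--             if key not in present:
--                 present.add(key)
--                 encounter.append(key)
--     pref_set = set(preferred)
--     return [c for c in preferred if c in present] + [k for k in encounter if k not in pref_set]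
-- ===== Notes on version B (the rewrite author's own statement) =====
-- stated objective: alternative
-- what changed: Replaces A's 13 preferred-column scans over the rows (each with an inner break-on-first-hit row loop and a shared seen-set threaded through both phases) by a single index-building pass that records every key in first-seen order plus a key set, followed by two independent filters: preferred keys that occur, then encountered keys outside the preferred set.
import Mathlib
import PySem

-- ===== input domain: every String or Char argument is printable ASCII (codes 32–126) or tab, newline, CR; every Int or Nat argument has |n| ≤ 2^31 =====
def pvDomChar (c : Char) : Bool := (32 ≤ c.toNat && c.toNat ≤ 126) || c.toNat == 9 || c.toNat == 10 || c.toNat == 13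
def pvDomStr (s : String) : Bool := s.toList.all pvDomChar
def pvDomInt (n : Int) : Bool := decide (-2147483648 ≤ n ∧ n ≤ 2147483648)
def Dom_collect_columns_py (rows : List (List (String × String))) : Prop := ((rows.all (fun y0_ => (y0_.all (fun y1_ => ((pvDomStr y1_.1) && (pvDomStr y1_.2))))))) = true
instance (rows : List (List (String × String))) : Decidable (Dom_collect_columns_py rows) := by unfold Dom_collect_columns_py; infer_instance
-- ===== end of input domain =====

-- B replaces A's 13 nested preferred-column scans over the rows by one index-building
-- pass (first-seen key order + key set) followed by two filters; return value only.

-- the literal `preferred` list both Pythons contain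
def pvPreferred : List String :=
  ["id", "category", "name", "type", "length_m", "area_m2", "volume_m3",
   "system_name", "system_abbreviation", "system_type", "system_classification",
   "flow", "calculated_size"]

-- the shared inner-loop body of Python's `if key not in seen: seen.add(key); out.append(key)`
def pvDedupStep (st : List String × PySem.Set String) (key : String) :
    List String × PySem.Set String :=
  if PySem.Set.contains st.2 key then st else (st.1 ++ [key], PySem.Set.add st.2 key)

-- ===== PORT A =====
-- A's inner `for row in rows: if col in row and col not in seen: …; break`
def pvPhase1Inner (rows : List (List (String × String))) (col : String)
    (cols : List String) (seen : PySem.Set String) : List String × PySem.Set String :=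
  match rows with
  | [] => (cols, seen)
  | row :: rest =>
      if (row.map Prod.fst).contains col && !(PySem.Set.contains seen col) then
        (cols ++ [col], PySem.Set.add seen col)
      else pvPhase1Inner rest col cols seen

def collect_columns_py (rows : List (List (String × String))) : List String :=
  let p1 := pvPreferred.foldl
    (fun (st : List String × PySem.Set String) col => pvPhase1Inner rows col st.1 st.2)
    ([], PySem.Set.empty)
  let p2 := rows.foldl
    (fun (st : List String × PySem.Set String) row => (row.map Prod.fst).foldl pvDedupStep st) p1
  p2.1

-- ===== PORT B =====
def collect_columns_py_alt (rows : List (List (String × String))) : List String :=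
  let st := rows.foldl
    (fun (st : List String × PySem.Set String) row => (row.map Prod.fst).foldl pvDedupStep st)
    ([], PySem.Set.empty)
  let prefSet := PySem.Set.ofList pvPreferred
  (pvPreferred.filter (fun c => PySem.Set.contains st.2 c)) ++
    (st.1.filter (fun k => !(PySem.Set.contains prefSet k)))

-- ===== PRECONDITION & SPEC =====
def Spec_collect_columns_py (rows : List (List (String × String))) (out : List String) : Prop := out = collect_columns_py_alt rows
instance (rows : List (List (String × String))) (out : List String) : Decidable (Spec_collect_columns_py rows out) := by unfold Spec_collect_columns_py; infer_instance

-- ===== CLAIM (what is proved, stated in full; the proofs are below) =====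
def Claim_equal_collect_columns_py : Prop := ∀ (rows : List (List (String × String))), Dom_collect_columns_py rows → Spec_collect_columns_py rows (collect_columns_py rows)

-- ===== LEMMAS AND PROOFS =====

-- all keys of all rows, in row-then-key order
def pvAllKeys (rows : List (List (String × String))) : List String :=
  rows.flatMap (fun r => r.map Prod.fst)

-- reference "dedup against an initial seen-list" function used only by the proofs
def pvFD : List String → List String → List String
  | [], _ => []
  | k :: ks, s => if s.contains k then pvFD ks s else k :: pvFD ks (s ++ [k])

-- `col` occurs as a key of some row
def pvHasCol (rows : List (List (String × String))) (col : String) : Bool :=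
  rows.any (fun r => (r.map Prod.fst).contains col)

lemma pvHasCol_iff (rows : List (List (String × String))) (col : String) :
    pvHasCol rows col = true ↔ col ∈ pvAllKeys rows := by
  simp [pvHasCol, pvAllKeys, List.any_eq_true, List.mem_flatMap]

lemma pvKeysFold_eq_allKeys (rows : List (List (String × String)))
    (st : List String × PySem.Set String) :
    rows.foldl (fun st row => (row.map Prod.fst).foldl pvDedupStep st) st
      = (pvAllKeys rows).foldl pvDedupStep st := by
  induction rows generalizing st with
  | nil => simp [pvAllKeys]
  | cons r rs ih =>
      simp only [List.foldl_cons]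
      rw [ih]
      show _ = (List.flatMap _ (r :: rs)).foldl pvDedupStep st
      rw [List.flatMap_cons, List.foldl_append]
      rfl

lemma pvFD_congr (L : List String) :
    ∀ (s s' : List String), (∀ x, x ∈ s ↔ x ∈ s') → pvFD L s = pvFD L s' := by
  induction L with
  | nil => intro s s' _; rfl
  | cons k ks ih =>
      intro s s' h
      have hc : s.contains k = s'.contains k := by
        by_cases hk : k ∈ s
        · have hk' : k ∈ s' := (h k).1 hk
          simp [hk, hk']
        · have hk' : k ∉ s' := fun hx => hk ((h k).2 hx)
          simp [hk, hk']
      simp only [pvFD, hc]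
      split
      · exact ih s s' h
      · rw [ih (s ++ [k]) (s' ++ [k]) (by intro x; simp [h x])]

lemma pvFD_union (L : List String) :
    ∀ (s t : List String), pvFD L (s ++ t) = (pvFD L t).filter (fun k => !s.contains k) := by
  induction L with
  | nil => intro s t; rfl
  | cons k ks ih =>
      intro s t
      by_cases ht : k ∈ t
      · have h1 : (s ++ t).contains k = true := by simp [ht]
        have h2 : t.contains k = true := by simp [ht]
        simp only [pvFD, h1, h2, if_true]
        exact ih s t
      · by_cases hs : k ∈ s
        · have h1 : (s ++ t).contains k = true := by simp [hs]
          have h2 : t.contains k = false := by simp [ht]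
          simp only [pvFD, h1, h2, Bool.false_eq_true, if_false, if_true]
          rw [pvFD_congr ks (s ++ t) (s ++ (t ++ [k])) (by
            intro x; simp only [List.mem_append, List.mem_singleton]
            constructor
            · rintro (hx | hx)
              · exact Or.inl hx
              · exact Or.inr (Or.inl hx)
            · rintro (hx | hx | rfl)
              · exact Or.inl hx
              · exact Or.inr hx
              · exact Or.inl hs)]
          rw [ih s (t ++ [k])]
          simp [hs]
        · have h1 : (s ++ t).contains k = false := by simp [hs, ht]
          have h2 : t.contains k = false := by simp [ht]
          simp only [pvFD, h1, h2, Bool.false_eq_true, if_false]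
          rw [show s ++ t ++ [k] = s ++ (t ++ [k]) by simp, ih s (t ++ [k])]
          simp [hs]

lemma pvFD_mem (L : List String) :
    ∀ (s : List String) (x : String), x ∈ pvFD L s → x ∈ L := by
  induction L with
  | nil => intro s x h; simp [pvFD] at h
  | cons k ks ih =>
      intro s x h
      simp only [pvFD] at h
      split at h
      · exact List.mem_cons_of_mem _ (ih _ _ h)
      · rcases List.mem_cons.mp h with h | h
        · simp [h]
        · exact List.mem_cons_of_mem _ (ih _ _ h)

-- the dedup fold characterised: first component and seen-membership
lemma pvDedupFold_char (L : List String) :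
    ∀ (c : List String) (s : PySem.Set String) (s' : List String),
      (∀ x, PySem.Set.contains s x = true ↔ x ∈ s') →
      ((L.foldl pvDedupStep (c, s)).1 = c ++ pvFD L s'
        ∧ ∀ x, PySem.Set.contains (L.foldl pvDedupStep (c, s)).2 x = true ↔ (x ∈ s' ∨ x ∈ L)) := by
  induction L with
  | nil => intro c s s' h; simpa [pvFD] using h
  | cons k ks ih =>
      intro c s s' h
      by_cases hk : k ∈ s'
      · have hc : PySem.Set.contains s k = true := (h k).2 hk
        have hc' : s'.contains k = true := List.contains_iff_mem.mpr hk
        simp only [List.foldl_cons, pvDedupStep, hc, if_true, pvFD, hc']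
        obtain ⟨h1, h2⟩ := ih c s s' h
        refine ⟨h1, fun x => ?_⟩
        rw [h2 x]
        constructor
        · rintro (h | h) <;> simp [h]
        · rintro (h | h)
          · exact Or.inl h
          · rcases List.mem_cons.mp h with rfl | h
            · exact Or.inl hk
            · exact Or.inr h
      · have hc : PySem.Set.contains s k = false := by
          by_contra hx
          exact hk ((h k).1 (Bool.of_not_eq_false hx))
        have hc' : s'.contains k = false := by simp [hk]
        simp only [List.foldl_cons, pvDedupStep, hc, Bool.false_eq_true, if_false, pvFD, hc']
        have hmem : ∀ x, PySem.Set.contains (PySem.Set.add s k) x = true ↔ x ∈ s' ++ [k] := by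
          intro x
          rw [show PySem.Set.contains (PySem.Set.add s k) x = true ↔ x ∈ PySem.Set.add s k by
            simp [PySem.Set.contains]]
          rw [PySem.Set.mem_add]
          constructor
          · rintro (hx | rfl)
            · simp [(h x).1 (by simp [PySem.Set.contains] at hx ⊢; exact hx)]
            · simp
          · intro hx
            rcases List.mem_append.mp hx with hx | hx
            · exact Or.inl (List.contains_iff_mem.mp ((h x).2 hx))
            · simp at hx; exact Or.inr hx
        obtain ⟨h1, h2⟩ := ih (c ++ [k]) (PySem.Set.add s k) (s' ++ [k]) hmem
        refine ⟨by rw [h1]; simp, fun x => ?_⟩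
        rw [h2 x]
        constructor
        · rintro (hx | hx)
          · rcases List.mem_append.mp hx with hx | hx
            · exact Or.inl hx
            · simp at hx; simp [hx]
          · simp [hx]
        · rintro (hx | hx)
          · exact Or.inl (List.mem_append.mpr (Or.inl hx))
          · rcases List.mem_cons.mp hx with rfl | hx
            · exact Or.inl (by simp)
            · exact Or.inr hx

-- A's phase-1 inner loop returns `if col unseen and present in some row then append`
lemma pvPhase1Inner_eq (rows : List (List (String × String))) (col : String) :
    ∀ (cols : List String) (seen : PySem.Set String),
      pvPhase1Inner rows col cols seen
        = if (!(PySem.Set.contains seen col)) && pvHasCol rows col then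
            (cols ++ [col], PySem.Set.add seen col)
          else (cols, seen) := by
  induction rows with
  | nil => intro cols seen; simp [pvPhase1Inner, pvHasCol]
  | cons r rs ih =>
      intro cols seen
      simp only [pvPhase1Inner, pvHasCol, List.any_cons, ih]
      by_cases h2 : col ∈ seen
      · simp [h2]
      · by_cases h1 : col ∈ r.map Prod.fst
        · simp [h1, h2]
        · have h1' : (List.map Prod.fst r).contains col = false := by simpa using h1
          simp only [h1', Bool.false_and, Bool.false_or]
          simp

-- A's phase-1 fold characterised
lemma pvPhase1_char (rows : List (List (String × String))) (pref : List String) :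
    ∀ (cols : List String) (seen : PySem.Set String) (s' : List String),
      pref.Nodup → (∀ x ∈ pref, x ∉ s') →
      (∀ x, PySem.Set.contains seen x = true ↔ x ∈ s') →
      ((pref.foldl (fun st col => pvPhase1Inner rows col st.1 st.2) (cols, seen)).1
          = cols ++ pref.filter (pvHasCol rows)
        ∧ ∀ x, PySem.Set.contains
            (pref.foldl (fun st col => pvPhase1Inner rows col st.1 st.2) (cols, seen)).2 x = true
              ↔ (x ∈ s' ∨ x ∈ pref.filter (pvHasCol rows))) := by
  induction pref with
  | nil => intro cols seen s' _ _ h; simpa using h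
  | cons p ps ih =>
      intro cols seen s' hnd hdisj h
      have hp : PySem.Set.contains seen p = false := by
        by_contra hx
        exact hdisj p (by simp) ((h p).1 (Bool.of_not_eq_false hx))
      by_cases hhas : pvHasCol rows p = true
      · have hstep : pvPhase1Inner rows p cols seen = (cols ++ [p], PySem.Set.add seen p) := by
          rw [pvPhase1Inner_eq]
          have hp' : p ∉ seen := by simpa [PySem.Set.contains] using hp
          simp [PySem.Set.contains, hp', hhas]
        have hmem : ∀ x, PySem.Set.contains (PySem.Set.add seen p) x = true ↔ x ∈ s' ++ [p] := by
          intro x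
          rw [show PySem.Set.contains (PySem.Set.add seen p) x = true ↔ x ∈ PySem.Set.add seen p by
            simp [PySem.Set.contains]]
          rw [PySem.Set.mem_add]
          constructor
          · rintro (hx | rfl)
            · simp [(h x).1 (by simpa [PySem.Set.contains] using hx)]
            · simp
          · intro hx
            rcases List.mem_append.mp hx with hx | hx
            · exact Or.inl ((by simpa [PySem.Set.contains] using (h x).2 hx))
            · simp at hx; exact Or.inr hx
        have hdisj' : ∀ x ∈ ps, x ∉ s' ++ [p] := by
          intro x hx
          simp only [List.mem_append, List.mem_singleton]
          rintro (hx' | rfl)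
          · exact hdisj x (by simp [hx]) hx'
          · exact (List.nodup_cons.mp hnd).1 hx
        obtain ⟨h1, h2⟩ := ih (cols ++ [p]) (PySem.Set.add seen p) (s' ++ [p])
          (List.nodup_cons.mp hnd).2 hdisj' hmem
        simp only [List.foldl_cons, hstep]
        refine ⟨by rw [h1]; simp [List.filter, hhas], fun x => ?_⟩
        rw [h2 x]
        simp only [List.filter, hhas]
        constructor
        · rintro (hx | hx)
          · rcases List.mem_append.mp hx with hx | hx
            · exact Or.inl hx
            · simp at hx; simp [hx]
          · simp [hx]
        · rintro (hx | hx)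
          · exact Or.inl (by simp [hx])
          · rcases List.mem_cons.mp hx with rfl | hx
            · exact Or.inl (by simp)
            · exact Or.inr hx
      · have hstep : pvPhase1Inner rows p cols seen = (cols, seen) := by
          rw [pvPhase1Inner_eq]; simp [hhas]
        obtain ⟨h1, h2⟩ := ih cols seen s' (List.nodup_cons.mp hnd).2
          (fun x hx => hdisj x (by simp [hx])) h
        simp only [List.foldl_cons, hstep]
        have hfil : (p :: ps).filter (pvHasCol rows) = ps.filter (pvHasCol rows) := by
          simp [List.filter, hhas]
        rw [hfil]
        exact ⟨h1, h2⟩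

lemma pvEmpty_char : ∀ x : String,
    PySem.Set.contains (PySem.Set.empty : PySem.Set String) x = true ↔ x ∈ ([] : List String) := by
  intro x; simp [PySem.Set.contains, PySem.Set.empty]

lemma pvPreferred_nodup : pvPreferred.Nodup := by decide

-- ===== VERDICT (by name: the statement is the Claim_ definition above) =====
theorem collect_columns_py_spec : Claim_equal_collect_columns_py := by
  intro rows _
  unfold Spec_collect_columns_py collect_columns_py collect_columns_py_alt
  show (rows.foldl (fun st row => (row.map Prod.fst).foldl pvDedupStep st)
        (pvPreferred.foldl (fun st col => pvPhase1Inner rows col st.1 st.2)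
          ([], PySem.Set.empty))).1
      = (pvPreferred.filter (fun c => PySem.Set.contains
            (rows.foldl (fun st row => (row.map Prod.fst).foldl pvDedupStep st)
              ([], PySem.Set.empty)).2 c)) ++
        ((rows.foldl (fun st row => (row.map Prod.fst).foldl pvDedupStep st)
              ([], PySem.Set.empty)).1.filter
          (fun k => !(PySem.Set.contains (PySem.Set.ofList pvPreferred) k)))
  -- characterise A's phase 1
  obtain ⟨ha1, ha2⟩ := pvPhase1_char rows pvPreferred [] PySem.Set.empty []
    pvPreferred_nodup (by simp) pvEmpty_char
  set p1 := pvPreferred.foldl (fun st col => pvPhase1Inner rows col st.1 st.2)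
    ([], PySem.Set.empty) with hp1
  -- both dedup folds, flattened
  rw [pvKeysFold_eq_allKeys rows p1, pvKeysFold_eq_allKeys rows ([], PySem.Set.empty)]
  have ha2' : ∀ x, PySem.Set.contains p1.2 x = true ↔ x ∈ pvPreferred.filter (pvHasCol rows) := by
    intro x; rw [ha2 x]; simp
  obtain ⟨hA, _⟩ := pvDedupFold_char (pvAllKeys rows) p1.1 p1.2
    (pvPreferred.filter (pvHasCol rows)) ha2'
  obtain ⟨hB1, hB2⟩ := pvDedupFold_char (pvAllKeys rows) [] PySem.Set.empty [] pvEmpty_char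
  rw [show (p1.1, p1.2) = p1 from rfl] at hA
  rw [show (([] : List String), (PySem.Set.empty : PySem.Set String))
      = (([], PySem.Set.empty) : List String × PySem.Set String) from rfl] at hB1 hB2
  rw [hA, hB1, ha1]
  simp only [List.nil_append]
  -- first blocks equal
  have hfirst : pvPreferred.filter (pvHasCol rows)
      = pvPreferred.filter (fun c =>
          PySem.Set.contains ((pvAllKeys rows).foldl pvDedupStep ([], PySem.Set.empty)).2 c) := by
    apply List.filter_congr
    intro c _
    by_cases hc : pvHasCol rows c = true
    · have hb := (hB2 c).2 (Or.inr ((pvHasCol_iff rows c).1 hc))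
      rw [hc, hb]
    · have hcl : c ∉ pvAllKeys rows := fun hx => hc ((pvHasCol_iff rows c).2 hx)
      have hb : PySem.Set.contains
          ((pvAllKeys rows).foldl pvDedupStep ([], PySem.Set.empty)).2 c = false := by
        by_contra hx
        rcases (hB2 c).1 (Bool.of_not_eq_false hx) with hx' | hx'
        · simp at hx'
        · exact hcl hx'
      have hc' : pvHasCol rows c = false := by simp [hc]
      rw [hc', hb]
  -- second blocks equal
  have hsecond : pvFD (pvAllKeys rows) (pvPreferred.filter (pvHasCol rows))
      = (pvFD (pvAllKeys rows) []).filter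
          (fun k => !(PySem.Set.contains (PySem.Set.ofList pvPreferred) k)) := by
    rw [show pvPreferred.filter (pvHasCol rows)
        = pvPreferred.filter (pvHasCol rows) ++ [] by simp]
    rw [pvFD_union]
    apply List.filter_congr
    intro k hk
    have hkL : k ∈ pvAllKeys rows := pvFD_mem (pvAllKeys rows) [] k hk
    have hkP : pvHasCol rows k = true := (pvHasCol_iff rows k).2 hkL
    by_cases hkp : k ∈ pvPreferred
    · have h1 : (pvPreferred.filter (pvHasCol rows)).contains k = true := by
        simp [List.mem_filter, hkp, hkP]
      have h2 : PySem.Set.contains (PySem.Set.ofList pvPreferred) k = true := by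
        simp [PySem.Set.contains, PySem.Set.mem_ofList, hkp]
      rw [h1, h2]
    · have h1 : (pvPreferred.filter (pvHasCol rows)).contains k = false := by
        simp [List.mem_filter]; intro hx; exact absurd hx hkp
      have h2 : PySem.Set.contains (PySem.Set.ofList pvPreferred) k = false := by
        simp [PySem.Set.contains, PySem.Set.mem_ofList]
        intro hx; exact absurd hx hkp
      rw [h1, h2]
  rw [hsecond, ← hfirst]
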